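-- pv_equiv track=rewrite | github.com/Minhao-Zhang/LeetCode | Solution.py | checkZeroOnes
-- ===== SOURCE A (Python) =====
-- def checkZeroOnes(s: str) -> bool:
--     oneLen = 0
--     zeroLen = 0
--
--     for i in range(len(s)):
--         if s[i] == '0':
--             count = 0;
--             for i in range(i, len(s), 1):
--                 if s[i] == '0':
--                     count += 1
--                 else:
--                     break
--             i += count
--             if count > zeroLen:
--                 zeroLen = count
--         else:
--             count = 0;
--             for i in range(i, len(s), 1):
--                 if s[i] == '1':
--                     count += 1
--                 else:
--                     break
--             i += count
--             if count > oneLen: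
--                 oneLen = count
--     return oneLen > zeroLen
-- ===== SOURCE B (Python) =====
-- def checkZeroOnes(s: str) -> bool:
--     # single pass: track current run length, update per-character maxima
--     best0 = 0
--     best1 = 0
--     prev = None
--     run = 0
--     for c in s:
--         run = run + 1 if c == prev else 1
--         prev = c
--         if c == '0':
--             if run > best0:
--                 best0 = run
--         elif c == '1':
--             if run > best1:
--                 best1 = run
--     return best1 > best0
-- ===== Notes on version B (the rewrite author's own statement) =====
-- stated objective: faster
-- what changed: Replaced A's rescan from each index (an inner loop counting the run starting at every position) by a single pass that maintains the current run length and per-character maxima.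
import Mathlib
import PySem

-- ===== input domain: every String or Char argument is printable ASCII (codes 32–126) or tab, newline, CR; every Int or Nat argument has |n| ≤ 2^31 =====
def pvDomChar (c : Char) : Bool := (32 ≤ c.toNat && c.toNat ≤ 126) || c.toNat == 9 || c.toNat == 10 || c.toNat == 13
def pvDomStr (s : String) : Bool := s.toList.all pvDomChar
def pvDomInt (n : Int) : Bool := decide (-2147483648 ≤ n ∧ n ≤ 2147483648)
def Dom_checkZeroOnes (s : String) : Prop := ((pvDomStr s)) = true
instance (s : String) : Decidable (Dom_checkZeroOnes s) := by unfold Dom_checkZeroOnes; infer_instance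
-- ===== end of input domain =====

-- B replaces A's per-index rescan of the run by a single pass with a running run length (faster).

-- ===== PORT A =====
-- inner loop: for i in range(i, len(s)): if s[i]==c: count+=1 else: break
def pvInnerCount : List Char → Char → Nat
  | [], _ => 0
  | x :: rest, c => if x = c then pvInnerCount rest c + 1 else 0

-- outer loop of A over indices i, seen as the suffix starting at i; carries (oneLen, zeroLen)
def pvLoopA : List Char → Nat → Nat → Nat × Nat
  | [], oneLen, zeroLen => (oneLen, zeroLen)
  | x :: rest, oneLen, zeroLen =>
    if x = '0' then
      let count := pvInnerCount (x :: rest) '0'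
      pvLoopA rest oneLen (if count > zeroLen then count else zeroLen)
    else
      let count := pvInnerCount (x :: rest) '1'
      pvLoopA rest (if count > oneLen then count else oneLen) zeroLen

def checkZeroOnes (s : String) : Bool :=
  let (oneLen, zeroLen) := pvLoopA s.toList 0 0
  oneLen > zeroLen

-- ===== PORT B =====
-- single pass: prev char, current run length, best run of '0' and of '1'
def pvLoopB : List Char → Option Char → Nat → Nat → Nat → Nat × Nat
  | [], _, _, best0, best1 => (best0, best1)
  | x :: rest, prev, run, best0, best1 =>
    let run' := if some x = prev then run + 1 else 1
    let best0' := if x = '0' then (if run' > best0 then run' else best0) else best0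
    let best1' := if x = '1' then (if run' > best1 then run' else best1) else best1
    pvLoopB rest (some x) run' best0' best1'

def checkZeroOnes_alt (s : String) : Bool :=
  let (best0, best1) := pvLoopB s.toList none 0 0 0
  best1 > best0

-- ===== PRECONDITION & SPEC =====
def Spec_checkZeroOnes (s : String) (out : Bool) : Prop := out = checkZeroOnes_alt s
instance (s : String) (out : Bool) : Decidable (Spec_checkZeroOnes s out) := by unfold Spec_checkZeroOnes; infer_instance

-- ===== CLAIM (what is proved, stated in full; the proofs are below) =====
def Claim_equal_checkZeroOnes : Prop := ∀ (s : String), Dom_checkZeroOnes s → Spec_checkZeroOnes s (checkZeroOnes s)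

-- ===== LEMMAS AND PROOFS =====

-- max over all suffixes of the run length starting there, for character c
def pvMaxRun (c : Char) : List Char → Nat
  | [] => 0
  | x :: rest => max (pvInnerCount (x :: rest) c) (pvMaxRun c rest)

-- B's loop without accumulators
def pvK (c : Char) : Option Char → Nat → List Char → Nat
  | _, _, [] => 0
  | prev, run, x :: rest =>
    let run' := if some x = prev then run + 1 else 1
    max (if x = c then run' else 0) (pvK c (some x) run' rest)

lemma innerCount_eq_zero {c : Char} : ∀ {cs : List Char}, cs.head? ≠ some c → pvInnerCount cs c = 0 := by
  intro cs h
  cases cs with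
  | nil => rfl
  | cons x rest =>
    simp only [List.head?, ne_eq, Option.some.injEq] at h
    simp [pvInnerCount, h]

lemma innerCount_pos {c : Char} : ∀ {cs : List Char}, cs.head? = some c → 1 ≤ pvInnerCount cs c := by
  intro cs h
  cases cs with
  | nil => simp at h
  | cons x rest =>
    simp only [List.head?, Option.some.injEq] at h
    simp [pvInnerCount, h]

lemma loopA_eq (cs : List Char) : ∀ o z, pvLoopA cs o z = (max o (pvMaxRun '1' cs), max z (pvMaxRun '0' cs)) := by
  induction cs with
  | nil => intro o z; simp [pvLoopA, pvMaxRun]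
  | cons x rest ih =>
    intro o z
    by_cases hx : x = '0'
    · subst hx
      have h1 : pvInnerCount ('0' :: rest) '1' = 0 := innerCount_eq_zero (by simp)
      simp only [pvLoopA, ih, pvMaxRun, h1, Prod.mk.injEq]
      split_ifs <;> first | (constructor <;> omega) | omega | (simp_all; try omega)
    · have h0 : pvInnerCount (x :: rest) '0' = 0 := innerCount_eq_zero (by simp [hx])
      simp only [pvLoopA, ih, pvMaxRun, h0, Prod.mk.injEq]
      split_ifs <;> first | (constructor <;> omega) | omega | (simp_all; try omega)

lemma loopB_eq (cs : List Char) : ∀ prev run b0 b1,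
    pvLoopB cs prev run b0 b1 = (max b0 (pvK '0' prev run cs), max b1 (pvK '1' prev run cs)) := by
  induction cs with
  | nil => intro prev run b0 b1; simp [pvLoopB, pvK]
  | cons x rest ih =>
    intro prev run b0 b1
    simp only [pvLoopB, pvK, ih, Prod.mk.injEq]
    constructor <;> split_ifs <;> omega

-- pvK extends the first run by `run` exactly when prev = some c and the list starts with c
lemma K_eq (c : Char) : ∀ (cs : List Char) (prev : Option Char) (run : Nat),
    pvK c prev run cs =
      if prev = some c ∧ cs.head? = some c then max (pvMaxRun c cs) (run + pvInnerCount cs c)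
      else pvMaxRun c cs := by
  intro cs
  induction cs with
  | nil => intro prev run; simp [pvK, pvMaxRun]
  | cons x rest ih =>
    intro prev run
    by_cases hx : x = c
    · subst hx
      have hic : pvInnerCount (x :: rest) x = pvInnerCount rest x + 1 := by simp [pvInnerCount]
      by_cases hr : rest.head? = some x
      · have h1 := innerCount_pos hr
        by_cases hp : prev = some x
        · have hp2 : (some x = prev) = True := by simp [hp]
          simp only [pvK, ih, pvMaxRun, hic, hp2, hr, hp, List.head?_cons, if_true]
          split_ifs <;> first | omega | (simp_all; try omega)
        · have hp2 : (some x = prev) = False := by simp [eq_comm, hp]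
          simp only [pvK, ih, pvMaxRun, hic, hp2, hr, List.head?_cons, if_false]
          split_ifs <;> first | omega | (simp_all; try omega)
      · have h0 := innerCount_eq_zero hr
        by_cases hp : prev = some x
        · have hp2 : (some x = prev) = True := by simp [hp]
          simp only [pvK, ih, pvMaxRun, hic, hp2, hp, h0, List.head?_cons, if_true]
          split_ifs <;> first | omega | (simp_all; try omega)
        · have hp2 : (some x = prev) = False := by simp [eq_comm, hp]
          simp only [pvK, ih, pvMaxRun, hic, hp2, h0, List.head?_cons, if_false]
          split_ifs <;> first | omega | (simp_all; try omega)
    · have hic : pvInnerCount (x :: rest) c = 0 := innerCount_eq_zero (by simp [hx])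
      simp only [pvK, ih, pvMaxRun, hic, if_neg hx, List.head?_cons]
      split_ifs <;> first | omega | (simp_all; try omega)

-- ===== VERDICT (by name: the statement is the Claim_ definition above) =====
theorem checkZeroOnes_spec : Claim_equal_checkZeroOnes := by
  intro s _
  unfold Spec_checkZeroOnes checkZeroOnes checkZeroOnes_alt
  rw [loopA_eq, loopB_eq, K_eq, K_eq]
  simp
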